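-- pv_equiv track=rewrite | github.com/teekaytai/advent-of-code | 2023/Day 13/manacher.py | find_palindrome_centre
-- ===== SOURCE A (Python) =====
-- from typing import Callable
--
-- NUM_DIFFERENCES = 1
--
-- bit_count: Callable[[int], int] = (
--     int.bit_count if hasattr(int, 'bit_count') else lambda num: bin(num).count('1')
-- )
--
-- def find_palindrome_centre(nums: list[int]) -> int:
--     # Add dummy numbers (-1) between elements so only odd length palindromes
--     # need to be considered and simplify algorithm
--     N = len(nums) * 2 - 1
--     expanded_nums = [-1] * N
--     expanded_nums[::2] = nums
--     palindrome_radii: list[int] = []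
--     # Boundaries of outer palindrome
--     lo = -1
--     hi = -1
--     for centre in range(N):
--         radius = 0
--         if centre <= hi:
--             mirror_centre = lo + (hi - centre)
--             radius = min(hi - centre, palindrome_radii[mirror_centre])
--         l = centre - radius - 1
--         r = centre + radius + 1
--         while l >= 0 and r < N and expanded_nums[l] == expanded_nums[r]:
--             radius += 1
--             l -= 1
--             r += 1
--         if centre + radius > hi:
--             lo = centre - radius
--             hi = centre + radius
--         palindrome_radii.append(radius)
--
--         # Part 1
--         # Check if palindrome is centred on dummy element, representing an even-length palindrome
--         # in the original sequence, and if the palindrome spans until one end of the sequence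
--         # if centre % 2 == 1 and (l == -1 or r == N):
--         #     return (centre + 1) // 2
--
--         # Part 2
--         # Check if palindrome is centred on dummy element, then continue expanding palindrome as
--         # long as not too many different bits found
--         if centre % 2 == 0:
--             continue
--         total_differences = 0
--         while l >= 0 and r < N:
--             total_differences += bit_count(expanded_nums[l] ^ expanded_nums[r])
--             if total_differences > NUM_DIFFERENCES:
--                 break
--             l -= 1
--             r += 1
--         if total_differences == NUM_DIFFERENCES:
--             return (centre + 1) // 2
--     return 0
-- ===== SOURCE B (Python) =====
-- from typing import Callable
--
-- NUM_DIFFERENCES = 1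
--
-- bit_count: Callable[[int], int] = (
--     int.bit_count if hasattr(int, 'bit_count') else lambda num: bin(num).count('1')
-- )
--
-- def find_palindrome_centre(nums: list[int]) -> int:
--     # Direct scan: for each reflection line i, sum bit differences of the
--     # mirrored pairs, breaking as soon as more than one differing bit is seen.
--     n = len(nums)
--     for i in range(1, n):
--         total = 0
--         k = 0
--         while i - 1 - k >= 0 and i + k < n:
--             total += bit_count(nums[i - 1 - k] ^ nums[i + k])
--             if total > NUM_DIFFERENCES:
--                 break
--             k += 1
--         if total == NUM_DIFFERENCES:
--             return i
--     return 0
-- ===== Notes on version B (the rewrite author's own statement) =====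
-- stated objective: simpler
-- what changed: Replaces Manacher's expanded dummy-element array, mirror-radius table and lo/hi window feeding the smudge scan by a direct scan over each reflection line of the original list, folding popcounts of XORed mirrored pairs with an early break once more than one bit differs.
import Mathlib
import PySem

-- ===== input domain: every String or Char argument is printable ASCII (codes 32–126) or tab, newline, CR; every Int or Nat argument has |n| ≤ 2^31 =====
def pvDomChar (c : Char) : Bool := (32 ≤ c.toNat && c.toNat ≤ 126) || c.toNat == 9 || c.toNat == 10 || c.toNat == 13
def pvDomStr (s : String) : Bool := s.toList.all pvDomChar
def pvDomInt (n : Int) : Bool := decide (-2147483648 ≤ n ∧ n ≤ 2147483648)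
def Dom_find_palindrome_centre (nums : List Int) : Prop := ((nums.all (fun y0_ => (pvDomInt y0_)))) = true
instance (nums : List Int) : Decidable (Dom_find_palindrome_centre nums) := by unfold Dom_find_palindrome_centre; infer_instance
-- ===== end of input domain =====

-- B replaces A's Manacher palindrome-radius machinery by a direct scan of every
-- reflection line, folding outward and stopping once more than one bit differs
-- (objective: simpler). Equivalence of the return values is proved below.

-- ===== PORT A =====
-- expanded_nums = [-1] * N; expanded_nums[::2] = nums  (reals at even slots, -1 at odd slots)
def pvExpand : List Int → List Int
  | [] => []
  | [x] => [x]
  | x :: xs => x :: (-1) :: pvExpand xs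

-- expanded_nums[idx] for the guarded in-range accesses of A
def pvE (nums : List Int) (idx : Int) : Int := (pvExpand nums).getD idx.toNat (-1)

-- the inner 'while l >= 0 and r < N and expanded_nums[l] == expanded_nums[r]' loop
def pvExtend (E : Int → Int) (N radius l r : Int) : Int × Int × Int :=
  if 0 ≤ l ∧ r < N ∧ E l = E r then pvExtend E N (radius + 1) (l - 1) (r + 1)
  else (radius, l, r)
termination_by (N - r).toNat
decreasing_by omega

-- the Part-2 'while l >= 0 and r < N' smudge-counting loop; returns total_differences
def pvSmudge (E : Int → Int) (N total l r : Int) : Int :=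
  if 0 ≤ l ∧ r < N then
    let t := total + (PySem.Int.bitCount (PySem.Int.bxor (E l) (E r)) : Int)
    if 1 < t then t else pvSmudge E N t (l - 1) (r + 1)
  else total
termination_by (N - r).toNat
decreasing_by omega

-- the 'for centre in range(N)' loop with state (palindrome_radii, lo, hi)
def pvLoopA (E : Int → Int) (N : Int) (radii : List Int) (lo hi centre : Int) : Int :=
  if centre < N then
    let radius0 := if centre ≤ hi then
        min (hi - centre) (radii.getD (lo + (hi - centre)).toNat 0) else 0
    match pvExtend E N radius0 (centre - radius0 - 1) (centre + radius0 + 1) with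
    | (radius, l, r) =>
      let lo' := if hi < centre + radius then centre - radius else lo
      let hi' := if hi < centre + radius then centre + radius else hi
      let radii' := radii ++ [radius]
      if PySem.Int.mod centre 2 = 0 then pvLoopA E N radii' lo' hi' (centre + 1)
      else
        let total := pvSmudge E N 0 l r
        if total = 1 then PySem.Int.floordiv (centre + 1) 2
        else pvLoopA E N radii' lo' hi' (centre + 1)
  else 0
termination_by (N - centre).toNat
decreasing_by all_goals omega

def find_palindrome_centre (nums : List Int) : Int :=
  pvLoopA (pvE nums) ((nums.length : Int) * 2 - 1) [] (-1) (-1) 0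

-- ===== PORT B =====
-- the 'while i - 1 - k >= 0 and i + k < n' loop of B; returns total
def pvSmudgeB (nums : List Int) (i total k : Int) : Int :=
  if 0 ≤ i - 1 - k ∧ i + k < (nums.length : Int) then
    let t := total + (PySem.Int.bitCount (PySem.Int.bxor
        (nums.getD (i - 1 - k).toNat 0) (nums.getD (i + k).toNat 0)) : Int)
    if 1 < t then t else pvSmudgeB nums i t (k + 1)
  else total
termination_by ((nums.length : Int) - (i + k)).toNat
decreasing_by omega

-- the 'for i in range(1, n)' loop of B
def pvLoopB (nums : List Int) (i : Int) : Int :=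
  if i < (nums.length : Int) then
    if pvSmudgeB nums i 0 0 = 1 then i else pvLoopB nums (i + 1)
  else 0
termination_by ((nums.length : Int) - i).toNat
decreasing_by omega

def find_palindrome_centre_alt (nums : List Int) : Int := pvLoopB nums 1

-- ===== PRECONDITION & SPEC =====
def Spec_find_palindrome_centre (nums : List Int) (out : Int) : Prop := out = find_palindrome_centre_alt nums
instance (nums : List Int) (out : Int) : Decidable (Spec_find_palindrome_centre nums out) := by unfold Spec_find_palindrome_centre; infer_instance

-- ===== CLAIM (what is proved, stated in full; the proofs are below) =====
def Claim_equal_find_palindrome_centre : Prop := ∀ (nums : List Int), Dom_find_palindrome_centre nums → Spec_find_palindrome_centre nums (find_palindrome_centre nums)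

-- ===== LEMMAS AND PROOFS =====

-- radius r is sound for centre c: in bounds, and all pairs within r match
def pvSound (E : Int → Int) (N c r : Int) : Prop :=
  0 ≤ r ∧ 0 ≤ c - r ∧ c + r < N ∧ ∀ j : Int, 1 ≤ j → j ≤ r → E (c - j) = E (c + j)

-- E[lo..hi] reads the same forwards and backwards
def pvPal (E : Int → Int) (lo hi : Int) : Prop :=
  ∀ j : Int, 0 ≤ j → j ≤ hi - lo → E (lo + j) = E (hi - j)

-- loop invariant of pvLoopA
def pvInv (E : Int → Int) (N : Int) (radii : List Int) (lo hi centre : Int) : Prop :=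
  (radii.length : Int) = centre ∧
  (∀ m : Nat, m < radii.length → pvSound E N (m : Int) (radii.getD m 0)) ∧
  ((lo = -1 ∧ hi = -1 ∧ centre = 0) ∨
   (0 ≤ lo ∧ hi < N ∧ lo ≤ hi ∧ lo + hi ≤ 2 * centre - 2 ∧ pvPal E lo hi))

theorem pvSound_mono {E : Int → Int} {N c r r' : Int} (h : pvSound E N c r)
    (h0 : 0 ≤ r') (h1 : r' ≤ r) : pvSound E N c r' := by
  obtain ⟨a, b, c', d⟩ := h
  exact ⟨h0, by omega, by omega, fun j hj hj' => d j hj (by omega)⟩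

theorem pvExpand_length (nums : List Int) (h : nums ≠ []) :
    (pvExpand nums).length = 2 * nums.length - 1 := by
  induction nums with
  | nil => simp at h
  | cons x xs ih =>
    cases xs with
    | nil => simp [pvExpand]
    | cons y ys =>
      have hx : pvExpand (x :: y :: ys) = x :: (-1) :: pvExpand (y :: ys) := rfl
      rw [hx]
      simp only [List.length_cons]
      rw [ih (by simp)]
      simp
      omega

theorem pvExpand_even (nums : List Int) : ∀ j : Nat, j < nums.length →
    (pvExpand nums).getD (2 * j) (-1) = nums.getD j 0 := by
  induction nums with
  | nil => intro j hj; simp at hj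
  | cons x xs ih =>
    intro j hj
    cases xs with
    | nil =>
      have : j = 0 := by simpa using hj
      subst this
      simp [pvExpand]
    | cons y ys =>
      have hx : pvExpand (x :: y :: ys) = x :: (-1) :: pvExpand (y :: ys) := rfl
      rw [hx]
      cases j with
      | zero => simp
      | succ j' =>
        have : 2 * (j' + 1) = (2 * j') + 1 + 1 := by omega
        rw [this]
        simp only [List.getD_cons_succ]
        exact ih j' (by simpa using Nat.lt_of_succ_lt_succ hj)

theorem pvExpand_odd (nums : List Int) : ∀ j : Nat, 2 * j + 1 < (pvExpand nums).length →
    (pvExpand nums).getD (2 * j + 1) (-1) = -1 := by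
  induction nums with
  | nil => intro j hj; simp [pvExpand] at hj
  | cons x xs ih =>
    intro j hj
    cases xs with
    | nil => simp [pvExpand] at hj
    | cons y ys =>
      have hx : pvExpand (x :: y :: ys) = x :: (-1) :: pvExpand (y :: ys) := rfl
      rw [hx] at hj ⊢
      cases j with
      | zero => simp
      | succ j' =>
        have : 2 * (j' + 1) + 1 = (2 * j' + 1) + 1 + 1 := by omega
        rw [this] at hj ⊢
        simp only [List.getD_cons_succ, List.length_cons] at hj ⊢
        exact ih j' (by omega)

-- the extension loop keeps the radius sound and returns l, r at distance radius+1
theorem pvExtend_spec (E : Int → Int) (N c r : Int) (hs : pvSound E N c r) :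
    pvSound E N c (pvExtend E N r (c - r - 1) (c + r + 1)).1 ∧
    (pvExtend E N r (c - r - 1) (c + r + 1)).2.1 = c - (pvExtend E N r (c - r - 1) (c + r + 1)).1 - 1 ∧
    (pvExtend E N r (c - r - 1) (c + r + 1)).2.2 = c + (pvExtend E N r (c - r - 1) (c + r + 1)).1 + 1 := by
  rw [pvExtend]
  split
  · rename_i hg
    obtain ⟨hg1, hg2, hg3⟩ := hg
    have hs' : pvSound E N c (r + 1) := by
      obtain ⟨a, b, c', d⟩ := hs
      refine ⟨by omega, by omega, by omega, ?_⟩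
      intro j hj hj'
      rcases lt_or_eq_of_le hj' with h | h
      · exact d j hj (by omega)
      · rw [h]
        have e1 : c - (r + 1) = c - r - 1 := by omega
        have e2 : c + (r + 1) = c + r + 1 := by omega
        rw [e1, e2]; exact hg3
    have e1 : c - r - 1 - 1 = c - (r + 1) - 1 := by omega
    have e2 : c + r + 1 + 1 = c + (r + 1) + 1 := by omega
    rw [e1, e2]
    exact pvExtend_spec E N c (r + 1) hs'
  · exact ⟨hs, rfl, rfl⟩
termination_by (N - (c + r)).toNat
decreasing_by omega

-- within a sound radius the smudge loop only passes over equal pairs: starting it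
-- after the exact extension gives the same total as starting at distance 1
theorem pvSmudge_shift (E : Int → Int) (N c : Int) : ∀ rn : Nat,
    pvSound E N c (rn : Int) →
    pvSmudge E N 0 (c - (rn : Int) - 1) (c + (rn : Int) + 1) = pvSmudge E N 0 (c - 1) (c + 1) := by
  intro rn
  induction rn with
  | zero => intro _; norm_num
  | succ m ih =>
    intro hs
    have hb := hs
    obtain ⟨a, b, c', d⟩ := hb
    have h1 : pvSmudge E N 0 (c - (m : Int) - 1) (c + (m : Int) + 1)
        = pvSmudge E N 0 (c - ((m : Int) + 1) - 1) (c + ((m : Int) + 1) + 1) := by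
      rw [pvSmudge]
      have hg : 0 ≤ c - (m : Int) - 1 ∧ c + (m : Int) + 1 < N := by
        push_cast at a b c'
        omega
      rw [if_pos hg]
      have he : E (c - (m : Int) - 1) = E (c + (m : Int) + 1) := by
        have := d ((m : Int) + 1) (by omega) (by push_cast; omega)
        have e1 : c - ((m : Int) + 1) = c - (m : Int) - 1 := by omega
        have e2 : c + ((m : Int) + 1) = c + (m : Int) + 1 := by omega
        rwa [e1, e2] at this
      rw [he]
      simp only [PySem.Int.bxor_self, PySem.Int.bitCount_zero, Nat.cast_zero]
      norm_num
      ring_nf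
    have h2 := ih (pvSound_mono hs (by positivity) (by push_cast; omega))
    have e1 : ((m + 1 : Nat) : Int) = (m : Int) + 1 := by push_cast; ring
    rw [e1, ← h1, h2]

-- A's smudge loop over the expanded array equals B's loop over nums:
-- real pairs contribute the same popcounts, dummy pairs contribute zero
theorem pvSmudge_eq_B (nums : List Int) (i : Int) : ∀ k total : Int, 0 ≤ k →
    pvSmudge (pvE nums) (2 * (nums.length : Int) - 1) total (2 * i - 2 - 2 * k) (2 * i + 2 * k)
      = pvSmudgeB nums i total k := by
  intro k total hk
  rw [pvSmudge, pvSmudgeB]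
  by_cases hg : 0 ≤ i - 1 - k ∧ i + k < (nums.length : Int)
  · rw [if_pos (by omega), if_pos hg]
    have hL : pvE nums (2 * i - 2 - 2 * k) = nums.getD (i - 1 - k).toNat 0 := by
      have h1 : (2 * i - 2 - 2 * k).toNat = 2 * (i - 1 - k).toNat := by omega
      have h2 : (i - 1 - k).toNat < nums.length := by omega
      rw [pvE, h1]
      exact pvExpand_even nums _ h2
    have hR : pvE nums (2 * i + 2 * k) = nums.getD (i + k).toNat 0 := by
      have h1 : (2 * i + 2 * k).toNat = 2 * (i + k).toNat := by omega
      have h2 : (i + k).toNat < nums.length := by omega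
      rw [pvE, h1]
      exact pvExpand_even nums _ h2
    rw [hL, hR]
    set t := total + (PySem.Int.bitCount (PySem.Int.bxor
        (nums.getD (i - 1 - k).toNat 0) (nums.getD (i + k).toNat 0)) : Int) with ht
    by_cases hbreak : 1 < t
    · rw [if_pos hbreak, if_pos hbreak]
    · rw [if_neg hbreak, if_neg hbreak]
      -- A takes one extra (dummy, dummy) step, adding 0
      rw [pvSmudge]
      by_cases hg2 : 0 ≤ i - 1 - (k + 1) ∧ i + (k + 1) < (nums.length : Int)
      · rw [if_pos (by omega)]
        have hlen : (pvExpand nums).length = 2 * nums.length - 1 :=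
          pvExpand_length nums (by intro h; rw [h] at hg2; simp at hg2; omega)
        have hDL : pvE nums (2 * i - 2 - 2 * k - 1) = -1 := by
          have h1 : (2 * i - 2 - 2 * k - 1).toNat = 2 * (i - k - 2).toNat + 1 := by omega
          rw [pvE, h1]
          exact pvExpand_odd nums _ (by rw [hlen]; omega)
        have hDR : pvE nums (2 * i + 2 * k + 1) = -1 := by
          have h1 : (2 * i + 2 * k + 1).toNat = 2 * (i + k).toNat + 1 := by omega
          rw [pvE, h1]
          exact pvExpand_odd nums _ (by rw [hlen]; omega)
        rw [hDL, hDR]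
        simp only [PySem.Int.bxor_self, PySem.Int.bitCount_zero, Nat.cast_zero]
        rw [if_neg (by omega)]
        have e1 : 2 * i - 2 - 2 * k - 1 - 1 = 2 * i - 2 - 2 * (k + 1) := by ring
        have e2 : 2 * i + 2 * k + 1 + 1 = 2 * i + 2 * (k + 1) := by ring
        have e3 : t + 0 = t := by ring
        rw [e1, e2, e3]
        exact pvSmudge_eq_B nums i (k + 1) t (by omega)
      · rw [if_neg (by omega), pvSmudgeB, if_neg (by omega)]
  · rw [if_neg (by omega), if_neg hg]
termination_by k _ _ => ((nums.length : Int) - (i + k)).toNat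
decreasing_by omega

theorem pvGetD_append_lt (radii : List Int) (x : Int) (m : Nat) (h : m < radii.length) :
    (radii ++ [x]).getD m 0 = radii.getD m 0 := by
  simp [List.getD, List.getElem?_append_left h]

theorem pvGetD_append_last (radii : List Int) (x : Int) :
    (radii ++ [x]).getD radii.length 0 = x := by
  simp [List.getD]

-- soundness of the mirrored initial radius
theorem pvMirror_sound (E : Int → Int) (N : Int) (radii : List Int) (lo hi centre : Int)
    (hlen : (radii.length : Int) = centre)
    (hstored : ∀ m : Nat, m < radii.length → pvSound E N (m : Int) (radii.getD m 0))
    (hlo : 0 ≤ lo) (hhiN : hi < N) (hlohi : lo ≤ hi) (hmid : lo + hi ≤ 2 * centre - 2)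
    (hpal : pvPal E lo hi) (hc : centre ≤ hi) :
    pvSound E N centre (min (hi - centre) (radii.getD (lo + (hi - centre)).toNat 0)) := by
  set mi : Int := lo + (hi - centre) with hmi
  have hmi0 : 0 ≤ mi := by omega
  have hmilt : mi < centre := by omega
  have hidx : ((mi.toNat : Int)) = mi := Int.toNat_of_nonneg hmi0
  have hmem : mi.toNat < radii.length := by omega
  have hst := hstored mi.toNat hmem
  rw [hidx] at hst
  obtain ⟨hr0, hr1, hr2, hpairs⟩ := hst
  set rm : Int := radii.getD mi.toNat 0
  refine ⟨by omega, by omega, by omega, ?_⟩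
  intro j hj1 hjr
  have hjm : j ≤ hi - centre := by omega
  have hjrm : j ≤ rm := by omega
  -- E (centre + j) = E (mi - j) via the palindrome
  have h1 : E (centre + j) = E (mi - j) := by
    have := hpal (hi - centre - j) (by omega) (by omega)
    have e1 : lo + (hi - centre - j) = mi - j := by omega
    have e2 : hi - (hi - centre - j) = centre + j := by omega
    rw [e1, e2] at this
    exact this.symm
  -- E (centre - j) = E (mi + j) via the palindrome
  have h2 : E (centre - j) = E (mi + j) := by
    have := hpal (centre - j - lo) (by omega) (by omega)
    have e1 : lo + (centre - j - lo) = centre - j := by omega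
    have e2 : hi - (centre - j - lo) = mi + j := by omega
    rw [e1, e2] at this
    exact this
  have h3 : E (mi - j) = E (mi + j) := hpairs j hj1 hjrm
  rw [h1, h2] at *
  rw [← h3, h1]

-- a sound radius yields the palindrome property for the new (lo, hi)
theorem pvSound_pal (E : Int → Int) (N c r : Int) (hs : pvSound E N c r) :
    pvPal E (c - r) (c + r) := by
  obtain ⟨hr0, _, _, hpairs⟩ := hs
  intro j hj0 hj1
  have e : c + r - (c - r) = 2 * r := by ring
  rw [e] at hj1
  rcases lt_trichotomy (r - j) 0 with h | h | h
  · have := hpairs (j - r) (by omega) (by omega)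
    have e1 : c - (j - r) = c + r - j := by ring
    have e2 : c + (j - r) = c - r + j := by ring
    rw [e1, e2] at this
    exact this.symm
  · have e1 : c - r + j = c + r - j := by omega
    rw [e1]
  · have := hpairs (r - j) (by omega) (by omega)
    have e1 : c - (r - j) = c - r + j := by ring
    have e2 : c + (r - j) = c + r - j := by ring
    rw [e1, e2] at this
    exact this

-- main loop correspondence: A's loop from centre equals B's loop from (centre+2)/2
theorem pvLoop_eq (nums : List Int) (radii : List Int) (lo hi centre : Int)
    (hinv : pvInv (pvE nums) (2 * (nums.length : Int) - 1) radii lo hi centre) :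
    pvLoopA (pvE nums) (2 * (nums.length : Int) - 1) radii lo hi centre
      = pvLoopB nums ((centre + 2) / 2) := by
  set E := pvE nums with hE
  set N : Int := 2 * (nums.length : Int) - 1 with hN
  obtain ⟨hlen, hstored, hdisj⟩ := hinv
  have hc0 : 0 ≤ centre := by omega
  rw [pvLoopA]
  by_cases hguard : centre < N
  · rw [if_pos hguard]
    dsimp only
    -- the initial radius is sound
    have hrad0 : pvSound E N centre (if centre ≤ hi then
        min (hi - centre) (radii.getD (lo + (hi - centre)).toNat 0) else 0) := by
      split
      · rename_i hch
        rcases hdisj with ⟨h1, h2, h3⟩ | ⟨h1, h2, h3, h4, h5⟩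
        · omega
        · exact pvMirror_sound E N radii lo hi centre hlen hstored h1 h2 h3 h4 h5 hch
      · exact ⟨le_refl 0, by omega, by omega, fun j hj hj' => by omega⟩
    set radius0 := if centre ≤ hi then
        min (hi - centre) (radii.getD (lo + (hi - centre)).toNat 0) else 0 with hr0def
    have hspec := pvExtend_spec E N centre radius0 hrad0
    rcases hE2 : pvExtend E N radius0 (centre - radius0 - 1) (centre + radius0 + 1)
      with ⟨radius, l, r⟩
    rw [hE2] at hspec
    simp only at hspec
    obtain ⟨hsound, hl, hr⟩ := hspec
    dsimp only
    subst hl hr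
    -- invariant at centre + 1
    have hinv' : pvInv E N (radii ++ [radius]) 
        (if hi < centre + radius then centre - radius else lo)
        (if hi < centre + radius then centre + radius else hi) (centre + 1) := by
      refine ⟨by simp; omega, ?_, ?_⟩
      · intro m hm
        simp only [List.length_append, List.length_cons, List.length_nil] at hm
        rcases Nat.lt_or_ge m radii.length with h | h
        · rw [pvGetD_append_lt radii radius m h]
          exact hstored m h
        · have hm' : m = radii.length := by omega
          rw [hm', pvGetD_append_last]
          have : ((radii.length : Nat) : Int) = centre := hlen
          rw [this]
          exact hsound
      · have hs0 := hsound.1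
        have hs1 := hsound.2.1
        have hs2 := hsound.2.2.1
        split
        · rename_i hupd
          right
          refine ⟨by omega, by omega, by omega, by omega, ?_⟩
          exact pvSound_pal E N centre radius hsound
        · rename_i hupd
          rcases hdisj with ⟨h1, h2, h3⟩ | ⟨h1, h2, h3, h4, h5⟩
          · omega
          · right; exact ⟨h1, h2, h3, by omega, h5⟩
    by_cases hpar : PySem.Int.mod centre 2 = 0
    · -- even centre: just advance; B's index is unchanged
      rw [if_pos hpar]
      have heven : centre % 2 = 0 := by
        rw [PySem.Int.mod_eq_emod_of_pos (by norm_num : (0:Int) < 2)] at hpar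
        exact hpar
      rw [pvLoop_eq nums _ _ _ _ hinv']
      have : (centre + 1 + 2) / 2 = (centre + 2) / 2 := by omega
      rw [this]
    · -- odd centre = 2*i - 1 with i = (centre+2)/2
      rw [if_neg hpar]
      have hodd : centre % 2 = 1 := by
        rw [PySem.Int.mod_eq_emod_of_pos (by norm_num : (0:Int) < 2)] at hpar
        omega
      set i : Int := (centre + 2) / 2 with hi_def
      have hci : centre = 2 * i - 1 := by omega
      -- the smudge total equals B's
      have hshift : pvSmudge E N 0 (centre - radius - 1) (centre + radius + 1)
          = pvSmudgeB nums i 0 0 := by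
        have hrn : pvSound E N centre ((radius.toNat : Int)) := by
          rwa [Int.toNat_of_nonneg hsound.1]
        have h1 := pvSmudge_shift E N centre radius.toNat hrn
        rw [Int.toNat_of_nonneg hsound.1] at h1
        rw [h1]
        have h2 := pvSmudge_eq_B nums i 0 0 (le_refl 0)
        have e1 : 2 * i - 2 - 2 * 0 = centre - 1 := by omega
        have e2 : 2 * i + 2 * 0 = centre + 1 := by omega
        rw [e1, e2] at h2
        rw [← hE, ← hN] at h2
        exact h2
      rw [hshift]
      rw [pvLoopB]
      have hgB : i < (nums.length : Int) := by omega
      rw [if_pos hgB]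
      by_cases hone : pvSmudgeB nums i 0 0 = 1
      · rw [if_pos hone, if_pos hone]
        rw [PySem.Int.floordiv_eq_ediv_of_pos (by norm_num : (0:Int) < 2)]
        omega
      · rw [if_neg hone, if_neg hone]
        rw [pvLoop_eq nums _ _ _ _ hinv']
        have : (centre + 1 + 2) / 2 = i + 1 := by omega
        rw [this]
  · rw [if_neg hguard]
    rw [pvLoopB]
    rw [if_neg (by omega)]
termination_by (2 * (nums.length : Int) - 1 - centre).toNat
decreasing_by all_goals omega

-- ===== VERDICT (by name: the statement is the Claim_ definition above) =====
theorem find_palindrome_centre_spec : Claim_equal_find_palindrome_centre := by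
  intro nums _
  unfold Spec_find_palindrome_centre find_palindrome_centre find_palindrome_centre_alt
  have hinv : pvInv (pvE nums) (2 * (nums.length : Int) - 1) [] (-1) (-1) 0 := by
    refine ⟨by simp, ?_, Or.inl ⟨rfl, rfl, rfl⟩⟩
    intro m hm
    simp at hm
  have h := pvLoop_eq nums [] (-1) (-1) 0 hinv
  have e : ((nums.length : Int)) * 2 - 1 = 2 * (nums.length : Int) - 1 := by ring
  rw [e, h]
  norm_num
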